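-- pv_equiv track=rewrite | github.com/jokylooky/Algorithms | Семинары/Семинар 1/ДЗ.py | circularNextGreaterElement
-- ===== SOURCE A (Python) =====
-- def circularNextGreaterElement(nums: list[int]) -> list[int]:
--     n = len(nums)
--     res = [-1] * n
--     stack = []
--
--     for i in range(2 * n - 1, -1, -1):
--         while stack and stack[-1] <= nums[i % n]:
--             stack.pop()
--
--         if stack:
--             res[i % n] = stack[-1]
--
--         stack.append(nums[i % n])
--
--     return res
-- ===== SOURCE B (Python) =====
-- def circularNextGreaterElement(nums: list[int]) -> list[int]:
--     # Direct circular scan: for each position, look at the next n-1 positions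
--     # (wrapping around) and take the first strictly greater value, else -1.
--     n = len(nums)
--     res = []
--     for i, x in enumerate(nums):
--         nxt = -1
--         for k in range(1, n):
--             c = nums[(i + k) % n]
--             if c > x:
--                 nxt = c
--                 break
--         res.append(nxt)
--     return res
-- ===== Notes on version B (the rewrite author's own statement) =====
-- stated objective: simpler
-- what changed: Replaces the backward doubled-index monotonic-stack pass with a plain nested scan: for each index, look at the next n-1 circular positions and return the first strictly greater value, else -1 (no stack, no doubled traversal, no in-place result array).
import Mathlib
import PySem

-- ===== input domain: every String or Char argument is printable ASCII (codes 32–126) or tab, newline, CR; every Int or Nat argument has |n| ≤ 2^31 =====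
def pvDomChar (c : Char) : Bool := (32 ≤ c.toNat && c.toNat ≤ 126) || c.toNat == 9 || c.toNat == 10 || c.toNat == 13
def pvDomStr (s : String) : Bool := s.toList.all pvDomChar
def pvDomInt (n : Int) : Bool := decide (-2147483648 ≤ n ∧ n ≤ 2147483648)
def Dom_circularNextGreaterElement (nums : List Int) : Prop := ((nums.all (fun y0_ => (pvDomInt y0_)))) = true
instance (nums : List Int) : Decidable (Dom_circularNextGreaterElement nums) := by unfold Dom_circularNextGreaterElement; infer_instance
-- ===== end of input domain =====

-- B replaces A's backward doubled-index monotonic-stack pass by a plain nested circular scan (simpler; not faster).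

-- ===== PORT A =====
-- the 'while stack and stack[-1] <= v: stack.pop()' loop; the stack is kept top-at-head (append = cons, stack[-1] = head)
def cngePop (v : Int) : List Int → List Int
  | [] => []
  | t :: rest => if t ≤ v then cngePop v rest else t :: rest

-- one iteration of A's 'for i in range(2*n-1, -1, -1)' loop body, state = (res, stack)
def cngeStep (nums : List Int) (n : Int) (st : List Int × List Int) (i : Int) : List Int × List Int :=
  let v := PySem.List.pyGetD nums (PySem.Int.mod i n) 0
  let stack := cngePop v st.2
  let res := match stack with
    | t :: _ => PySem.List.pySetD st.1 (PySem.Int.mod i n) t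
    | [] => st.1
  (res, v :: stack)

def circularNextGreaterElement (nums : List Int) : List Int :=
  let n : Int := (nums.length : Int)
  ((PySem.List.pyRange (2 * n - 1) (-1) (-1)).foldl (cngeStep nums n)
      (List.replicate nums.length (-1), [])).1

-- ===== PORT B =====
-- B's inner 'for k in range(1, n): … break' loop: first nums[(i+k)%n] greater than x, else -1
def cngeScan (nums : List Int) (n : Int) (i : Int) (x : Int) : List Int → Int
  | [] => -1
  | k :: rest =>
      let c := PySem.List.pyGetD nums (PySem.Int.mod (i + k) n) 0
      if c > x then c else cngeScan nums n i x rest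

def circularNextGreaterElement_alt (nums : List Int) : List Int :=
  let n : Int := (nums.length : Int)
  (PySem.List.enumerate nums 0).map (fun p => cngeScan nums n p.1 p.2 (PySem.List.pyRange 1 n 1))

-- ===== PRECONDITION & SPEC =====
def Spec_circularNextGreaterElement (nums : List Int) (out : List Int) : Prop := out = circularNextGreaterElement_alt nums
instance (nums : List Int) (out : List Int) : Decidable (Spec_circularNextGreaterElement nums out) := by unfold Spec_circularNextGreaterElement; infer_instance

-- ===== CLAIM (what is proved, stated in full; the proofs are below) =====
def Claim_equal_circularNextGreaterElement : Prop := ∀ (nums : List Int), Dom_circularNextGreaterElement nums → Spec_circularNextGreaterElement nums (circularNextGreaterElement nums)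

-- ===== LEMMAS AND PROOFS =====

-- the doubled list: position i of A's loop reads dbl[i]
def cngeDbl (nums : List Int) : List Int := nums ++ nums

-- strict prefix-maxima ("records") of a list, scanning left to right; A's stack after
-- processing a suffix is exactly the records of that suffix (top at head)
def cngeRecords : List Int → List Int
  | [] => []
  | a :: l => a :: (cngeRecords l).filter (fun t => decide (a < t))

-- first element greater than x, else -1
def cngeFGt (x : Int) (l : List Int) : Int := ((l.find? (fun c => decide (x < c))).getD (-1))

-- res[j] after the loop has processed all indices i ≥ k
def cngeResVal (nums : List Int) (k j : Nat) : Int :=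
  let x := nums.getD j 0
  if k ≤ j then cngeFGt x ((cngeDbl nums).drop (j + 1))
  else if k ≤ j + nums.length then cngeFGt x ((cngeDbl nums).drop (j + nums.length + 1))
  else -1

lemma cngeRecords_pairwise (l : List Int) : (cngeRecords l).Pairwise (· < ·) := by
  induction l with
  | nil => simp [cngeRecords]
  | cons a l ih =>
      simp only [cngeRecords, List.pairwise_cons]
      refine ⟨fun t ht => ?_, ih.filter _⟩
      have := List.of_mem_filter ht
      simpa using this


lemma cngePop_eq_filter (v : Int) (l : List Int) (h : l.Pairwise (· < ·)) :
    cngePop v l = l.filter (fun t => decide (v < t)) := by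
  induction l with
  | nil => simp [cngePop]
  | cons a l ih =>
      rcases List.pairwise_cons.mp h with ⟨ha, hl⟩
      by_cases hav : a ≤ v
      · have : ¬ v < a := not_lt.mpr hav
        simp [cngePop, hav, this, ih hl]
      · have hav : v < a := lt_of_not_ge hav
        have hrest : l.filter (fun t => decide (v < t)) = l := by
          apply List.filter_eq_self.mpr
          intro t ht
          exact decide_eq_true (lt_trans hav (ha t ht))
        simp [cngePop, not_le.mpr hav, hav, hrest]


lemma find?_filter_of_imp {p q : Int → Bool} (l : List Int)
    (h : ∀ c, q c = false → p c = false) : (l.filter q).find? p = l.find? p := by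
  induction l with
  | nil => simp
  | cons a l ih =>
      by_cases hq : q a
      · by_cases hp : p a
        · simp [hq, hp]
        · simp only [Bool.not_eq_true] at hp
          simp [hq, hp, ih]
      · simp only [Bool.not_eq_true] at hq
        have hp := h a hq
        simp [hq, hp, ih]


lemma find?_records (x : Int) (l : List Int) :
    (cngeRecords l).find? (fun c => decide (x < c)) = l.find? (fun c => decide (x < c)) := by
  induction l with
  | nil => rfl
  | cons a l ih =>
      by_cases hxa : x < a
      · simp [cngeRecords, hxa]
      · have h1 : ((cngeRecords l).filter (fun t => decide (a < t))).find?
            (fun c => decide (x < c)) = (cngeRecords l).find? (fun c => decide (x < c)) := by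
          apply find?_filter_of_imp
          intro c hc
          simp only [decide_eq_false_iff_not, not_lt] at hc ⊢
          exact le_trans hc (not_lt.mp hxa)
        simp [cngeRecords, hxa, h1, ih]


lemma head?_filter (p : Int → Bool) (l : List Int) : (l.filter p).head? = l.find? p := by
  induction l with
  | nil => rfl
  | cons a l ih =>
      by_cases hp : p a
      · simp [hp]
      · simp only [Bool.not_eq_true] at hp
        simp [hp, ih]


lemma find?_drop_eq_none {p : Int → Bool} (l : List Int) (m : Nat)
    (h : l.find? p = none) : (l.drop m).find? p = none := by
  rw [List.find?_eq_none] at h ⊢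
  intro x hx
  exact h x (List.mem_of_mem_drop hx)


lemma cngeDbl_getD (nums : List Int) (k : Nat) (h : k < 2 * nums.length) :
    (cngeDbl nums).getD k 0 = nums.getD (k % nums.length) 0 := by
  by_cases hk : k < nums.length
  · rw [Nat.mod_eq_of_lt hk]
    rw [List.getD_eq_getElem?_getD, List.getD_eq_getElem?_getD]
    simp [cngeDbl, List.getElem?_append_left hk]
  · have hk' : nums.length ≤ k := Nat.le_of_not_lt hk
    have h2 : k % nums.length = k - nums.length := by
      conv_lhs => rw [show k = (k - nums.length) + nums.length by omega]
      rw [Nat.add_mod_right]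
      exact Nat.mod_eq_of_lt (by omega)
    rw [h2, List.getD_eq_getElem?_getD, List.getD_eq_getElem?_getD]
    simp [cngeDbl, List.getElem?_append_right hk']

lemma cnge_mod_sub (n k : Nat) (h1 : n ≤ k) (h2 : k < 2 * n) : k % n = k - n := by
  conv_lhs => rw [show k = (k - n) + n by omega]
  rw [Nat.add_mod_right]
  exact Nat.mod_eq_of_lt (by omega)

lemma cngeResVal_stable (nums : List Int) (k j : Nat) (hj : j < nums.length)
    (hk : k < 2 * nums.length) (hne : j ≠ k % nums.length) :
    cngeResVal nums (k + 1) j = cngeResVal nums k j := by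
  have hpos : 0 < nums.length := by omega
  unfold cngeResVal
  rcases Nat.lt_or_ge k nums.length with hlt | hge
  · have hm : k % nums.length = k := Nat.mod_eq_of_lt hlt
    rw [hm] at hne
    split_ifs <;> first | rfl | omega
  · have hm : k % nums.length = k - nums.length := cnge_mod_sub _ _ hge hk
    rw [hm] at hne
    split_ifs <;> first | rfl | omega

lemma cngeResVal_none (nums : List Int) (k : Nat) (hk : k < 2 * nums.length)
    (hpos : 0 < nums.length)
    (hnone : ((cngeDbl nums).drop (k + 1)).find?
        (fun c => decide (nums.getD (k % nums.length) 0 < c)) = none) :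
    cngeResVal nums (k + 1) (k % nums.length) = cngeResVal nums k (k % nums.length) := by
  rcases Nat.lt_or_ge k nums.length with hlt | hge
  · have hm : k % nums.length = k := Nat.mod_eq_of_lt hlt
    rw [hm] at hnone ⊢
    unfold cngeResVal
    rw [if_neg (by omega), if_pos (by omega), if_pos (by omega)]
    have h1 : ((cngeDbl nums).drop (k + nums.length + 1)).find?
        (fun c => decide (nums.getD k 0 < c)) = none := by
      rw [show k + nums.length + 1 = (k + 1) + nums.length by omega, ← List.drop_drop]
      exact find?_drop_eq_none _ _ hnone
    unfold cngeFGt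
    rw [h1, hnone]
  · have hm : k % nums.length = k - nums.length := cnge_mod_sub _ _ hge hk
    rw [hm] at hnone ⊢
    unfold cngeResVal
    rw [if_neg (by omega), if_neg (by omega), if_neg (by omega),
      if_pos (by omega), show k - nums.length + nums.length + 1 = k + 1 by omega]
    unfold cngeFGt
    rw [hnone]
    rfl

lemma cngeResVal_write (nums : List Int) (k : Nat) (hk : k < 2 * nums.length)
    (hpos : 0 < nums.length) (t : Int)
    (hsome : ((cngeDbl nums).drop (k + 1)).find?
        (fun c => decide (nums.getD (k % nums.length) 0 < c)) = some t) :
    cngeResVal nums k (k % nums.length) = t := by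
  rcases Nat.lt_or_ge k nums.length with hlt | hge
  · have hm : k % nums.length = k := Nat.mod_eq_of_lt hlt
    rw [hm] at hsome ⊢
    unfold cngeResVal
    rw [if_pos (by omega)]
    unfold cngeFGt
    rw [hsome]
    rfl
  · have hm : k % nums.length = k - nums.length := cnge_mod_sub _ _ hge hk
    rw [hm] at hsome ⊢
    unfold cngeResVal
    rw [if_neg (by omega), if_pos (by omega),
      show k - nums.length + nums.length + 1 = k + 1 by omega]
    unfold cngeFGt
    rw [hsome]
    rfl

-- A's loop invariant
lemma cnge_loop_inv (nums : List Int) (hn : nums ≠ []) (k : Nat) (hk : k ≤ 2 * nums.length) :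
    (PySem.List.pyRange (2 * (nums.length : Int) - 1) ((k : Int) - 1) (-1)).foldl
        (cngeStep nums (nums.length : Int)) (List.replicate nums.length (-1), []) =
      ((List.range nums.length).map (cngeResVal nums k), cngeRecords ((cngeDbl nums).drop k)) := by
  have hpos : 0 < nums.length := List.length_pos_iff.mpr hn
  obtain ⟨m, hm⟩ : ∃ m, k + m = 2 * nums.length := ⟨2 * nums.length - k, by omega⟩
  clear hk
  induction m generalizing k with
  | zero =>
      have hk2 : k = 2 * nums.length := by omega
      subst hk2
      rw [PySem.List.pyRange_neg_one_eq_nil (by push_cast; omega)]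
      simp only [List.foldl_nil]
      have h2 : (cngeDbl nums).drop (2 * nums.length) = [] := by
        apply List.drop_eq_nil_of_le
        simp [cngeDbl]
        omega
      have h1 : (List.range nums.length).map (cngeResVal nums (2 * nums.length)) =
          List.replicate nums.length (-1) := by
        apply List.ext_getElem
        · simp
        · intro j hj1 hj2
          simp only [List.length_map, List.length_range] at hj1
          simp only [List.getElem_map, List.getElem_range, List.getElem_replicate]
          unfold cngeResVal
          rw [if_neg (by omega), if_neg (by omega)]
      rw [h2, h1]
      simp [cngeRecords]
  | succ m ih =>
      have hk2 : k < 2 * nums.length := by omega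
      have hsplit : PySem.List.pyRange (2 * (nums.length : Int) - 1) ((k : Int) - 1) (-1) =
          PySem.List.pyRange (2 * (nums.length : Int) - 1) (((k + 1 : Nat) : Int) - 1) (-1)
            ++ [(k : Int)] := by
        rw [PySem.List.pyRange_neg_one_eq_reverse, PySem.List.pyRange_neg_one_eq_reverse]
        have e1 : (k : Int) - 1 + 1 = (k : Int) := by ring
        have e2 : ((k + 1 : Nat) : Int) - 1 + 1 = (k : Int) + 1 := by push_cast; ring
        rw [e1, e2, PySem.List.pyRange_one_cons (by omega)]
        simp
      rw [hsplit, List.foldl_append, ih (k + 1) (by omega)]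
      simp only [List.foldl_cons, List.foldl_nil]
      have hmlt : k % nums.length < nums.length := Nat.mod_lt _ hpos
      set w := nums.getD (k % nums.length) 0 with hwdef
      have hv : PySem.List.pyGetD nums (PySem.Int.mod (k : Int) (nums.length : Int)) 0 = w := by
        rw [PySem.Int.mod_natCast, PySem.List.pyGetD_natCast]
      have hlen2 : k < (cngeDbl nums).length := by
        simp [cngeDbl]
        omega
      have hdropk : (cngeDbl nums).drop k = w :: (cngeDbl nums).drop (k + 1) := by
        rw [List.drop_eq_getElem_cons hlen2]
        congr 1
        rw [← List.getD_eq_getElem _ 0 hlen2, cngeDbl_getD nums k hk2]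
      have hpop : cngePop w (cngeRecords ((cngeDbl nums).drop (k + 1))) =
          (cngeRecords ((cngeDbl nums).drop (k + 1))).filter (fun t => decide (w < t)) :=
        cngePop_eq_filter _ _ (cngeRecords_pairwise _)
      have hstack : w :: (cngeRecords ((cngeDbl nums).drop (k + 1))).filter
            (fun t => decide (w < t)) = cngeRecords ((cngeDbl nums).drop k) := by
        rw [hdropk]
        rfl
      have hhead : ((cngeRecords ((cngeDbl nums).drop (k + 1))).filter
            (fun t => decide (w < t))).head? =
          ((cngeDbl nums).drop (k + 1)).find? (fun c => decide (w < c)) := by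
        rw [head?_filter, find?_records]
      simp only [cngeStep, hv, hpop]
      cases hS : (cngeRecords ((cngeDbl nums).drop (k + 1))).filter
          (fun t => decide (w < t)) with
      | nil =>
          have hnone : ((cngeDbl nums).drop (k + 1)).find? (fun c => decide (w < c)) = none := by
            rw [← hhead, hS]
            rfl
          rw [hwdef] at hnone
          simp only [Prod.mk.injEq]
          constructor
          · apply List.map_congr_left
            intro j hj
            have hjn : j < nums.length := List.mem_range.mp hj
            by_cases hje : j = k % nums.length
            · subst hje
              exact cngeResVal_none nums k hk2 hpos hnone
            · exact cngeResVal_stable nums k j hjn hk2 hje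
          · rw [← hstack, hS]
      | cons t rest =>
          have hsome : ((cngeDbl nums).drop (k + 1)).find? (fun c => decide (w < c)) = some t := by
            rw [← hhead, hS]
            rfl
          rw [hwdef] at hsome
          simp only [Prod.mk.injEq]
          constructor
          · rw [PySem.Int.mod_natCast, PySem.List.pySetD_natCast]
            apply List.ext_getElem
            · simp
            · intro j hj1 hj2
              simp only [List.length_set, List.length_map, List.length_range] at hj1
              simp only [List.getElem_map, List.getElem_range]
              by_cases hje : j = k % nums.length
              · subst hje
                rw [List.getElem_set_self]
                exact (cngeResVal_write nums k hk2 hpos t hsome).symm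
              · rw [List.getElem_set_ne (by omega)]
                simp only [List.getElem_map, List.getElem_range]
                exact cngeResVal_stable nums k j hj1 hk2 hje
          · rw [← hstack, hS]

lemma cngeScan_eq_fGt (nums : List Int) (n i x : Int) (ks : List Int) :
    cngeScan nums n i x ks = cngeFGt x (ks.map (fun k => PySem.List.pyGetD nums (PySem.Int.mod (i + k) n) 0)) := by
  induction ks with
  | nil => rfl
  | cons k rest ih =>
      by_cases hc : x < PySem.List.pyGetD nums (PySem.Int.mod (i + k) n) 0
      · simp [cngeScan, cngeFGt, hc, gt_iff_lt]
      · simp only [cngeScan, gt_iff_lt, if_neg hc, ih, cngeFGt]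
        simp [hc]


lemma cnge_window (nums : List Int) (j : Nat) (hj : j < nums.length) :
    (PySem.List.pyRange 1 (nums.length : Int) 1).map
        (fun k => PySem.List.pyGetD nums (PySem.Int.mod ((j : Int) + k) (nums.length : Int)) 0) =
      nums.drop (j + 1) ++ nums.take j := by
  have hpos : 0 < nums.length := by omega
  rw [PySem.List.pyRange_one, List.map_map]
  apply List.ext_getElem
  · simp
    omega
  · intro t ht1 ht2
    simp only [List.length_map, List.length_range] at ht1
    have htn : t < nums.length - 1 := by omega
    simp only [List.getElem_map, List.getElem_range, Function.comp_apply]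
    have harg : ((j : Int) + ((1 : Int) + (t : Nat))) = ((j + 1 + t : Nat) : Int) := by
      push_cast; ring
    rw [harg, PySem.Int.mod_natCast, PySem.List.pyGetD_natCast]
    rcases Nat.lt_or_ge (j + 1 + t) nums.length with hlt | hge
    · rw [Nat.mod_eq_of_lt hlt,
        List.getElem_append_left (by simp only [List.length_drop]; omega),
        List.getElem_drop, List.getD_eq_getElem _ _ (by omega)]
    · have hub : j + 1 + t < 2 * nums.length := by omega
      rw [cnge_mod_sub _ _ hge hub,
        List.getElem_append_right (by simp only [List.length_drop]; omega),
        List.getElem_take, List.getD_eq_getElem _ _ (by omega)]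
      congr 1
      simp only [List.length_drop]
      omega


lemma cnge_fGt_eq (nums : List Int) (j : Nat) (hj : j < nums.length) :
    cngeFGt (nums.getD j 0) ((cngeDbl nums).drop (j + 1)) =
      cngeFGt (nums.getD j 0) (nums.drop (j + 1) ++ nums.take j) := by
  have hdd : (cngeDbl nums).drop (j + 1) = nums.drop (j + 1) ++ nums := by
    unfold cngeDbl
    rw [List.drop_append_of_le_length (by omega)]
  unfold cngeFGt
  set x := nums.getD j 0 with hxdef
  rw [hdd, List.find?_append, List.find?_append]
  cases hfa : (nums.drop (j + 1)).find? (fun c => decide (x < c)) with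
  | some t => simp
  | none =>
      have hnums : nums = nums.take j ++ x :: nums.drop (j + 1) := by
        rw [hxdef]
        conv_lhs => rw [← List.take_append_drop j nums]
        congr 1
        rw [List.drop_eq_getElem_cons hj, List.getD_eq_getElem _ _ hj]
      have h2 : nums.find? (fun c => decide (x < c)) =
          (nums.take j).find? (fun c => decide (x < c)) := by
        conv_lhs => rw [hnums]
        rw [List.find?_append, List.find?_cons]
        simp [hfa]
      simp [h2]

lemma cnge_alt_eq (nums : List Int) :
    circularNextGreaterElement_alt nums =
      (List.range nums.length).map
        (fun j => cngeFGt (nums.getD j 0) (nums.drop (j + 1) ++ nums.take j)) := by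
  unfold circularNextGreaterElement_alt
  apply List.ext_getElem
  · simp [PySem.List.length_enumerate]
  · intro j hj1 hj2
    simp only [List.length_map, PySem.List.length_enumerate] at hj1
    simp only [List.getElem_map, PySem.List.getElem_enumerate, List.getElem_range, zero_add]
    rw [cngeScan_eq_fGt, cnge_window nums j hj1, List.getD_eq_getElem _ _ hj1]


-- ===== VERDICT (by name: the statement is the Claim_ definition above) =====
theorem circularNextGreaterElement_spec : Claim_equal_circularNextGreaterElement := by
  intro nums _
  unfold Spec_circularNextGreaterElement
  by_cases hn : nums = []
  · subst hn
    rfl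
  · have hinv := cnge_loop_inv nums hn 0 (by omega)
    rw [show ((0 : Nat) : Int) - 1 = (-1 : Int) by norm_num] at hinv
    have hA : circularNextGreaterElement nums =
        (List.range nums.length).map (cngeResVal nums 0) := by
      simp only [circularNextGreaterElement]
      rw [hinv]
    rw [hA, cnge_alt_eq]
    apply List.map_congr_left
    intro j hj
    have hjn := List.mem_range.mp hj
    unfold cngeResVal
    rw [if_pos (Nat.zero_le j)]
    exact cnge_fGt_eq nums j hjn
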